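-- pv_equiv track=rewrite | github.com/prasath1196/Problem-Solving-2021 | strong_language.py | is_strong_language
-- ===== SOURCE A (Python) =====
-- def is_strong_language(word,k,n):
--   res = "NO"
--   count = 0
--   for letter in word:
--     if letter == "*":
--       count+=1
--     else:
--       if count == k:
--         res = "YES"
--         break
--       else:
--         count = 0
--   return res
-- ===== SOURCE B (Python) =====
-- def is_strong_language(word, k, n):
--     # pass 1: pre[i] = number of consecutive '*' immediately before index i
--     pre = []
--     run = 0
--     for ch in word:
--         pre.append(run)
--         run = run + 1 if ch == "*" else 0
--     # pass 2: first non-star position preceded by exactly k stars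
--     for i in range(len(word)):
--         if word[i] != "*" and pre[i] == k:
--             return "YES"
--     return "NO"
-- ===== Notes on version B (the rewrite author's own statement) =====
-- stated objective: alternative
-- what changed: Replaces A's single stateful break-out loop by a two-pass scheme: build a prefix table of consecutive-star counts, then scan the string for a non-star position whose table entry equals k.
import Mathlib
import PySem

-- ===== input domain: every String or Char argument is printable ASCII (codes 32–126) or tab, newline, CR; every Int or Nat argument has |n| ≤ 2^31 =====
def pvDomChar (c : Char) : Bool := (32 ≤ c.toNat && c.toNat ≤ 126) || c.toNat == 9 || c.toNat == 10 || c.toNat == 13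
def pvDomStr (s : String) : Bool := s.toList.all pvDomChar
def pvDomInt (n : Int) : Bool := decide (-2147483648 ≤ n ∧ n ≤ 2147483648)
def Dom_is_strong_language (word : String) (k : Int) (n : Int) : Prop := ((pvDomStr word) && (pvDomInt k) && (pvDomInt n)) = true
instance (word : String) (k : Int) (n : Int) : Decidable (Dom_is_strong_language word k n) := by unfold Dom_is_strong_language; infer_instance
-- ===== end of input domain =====

-- B replaces A's single stateful break-out loop by a prefix table of star-run
-- lengths plus a separate scan (alternative decomposition; same exact behaviour).

-- ===== PORT A =====
-- A's for-loop with break, as structural recursion over the characters,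
-- carrying the counter 'count'; returning means break / end of loop.
def pvLoopA (k : Int) : List Char → Int → String
  | [], _ => "NO"
  | ch :: t, count =>
    if ch = '*' then pvLoopA k t (count + 1)
    else if count = k then "YES"
    else pvLoopA k t 0

def is_strong_language (word : String) (k : Int) (n : Int) : String :=
  pvLoopA k word.toList 0

-- ===== PORT B =====
-- pass 1 of Source B: pre[i] = number of consecutive '*' immediately before i
def pvBuildPre : List Char → Int → List Int
  | [], _ => []
  | ch :: t, run => run :: pvBuildPre t (if ch = '*' then run + 1 else 0)

-- pass 2 of Source B: scan word together with its pre-table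
def pvScanB (k : Int) : List (Char × Int) → String
  | [] => "NO"
  | (ch, p) :: t => if ch ≠ '*' ∧ p = k then "YES" else pvScanB k t

def is_strong_language_alt (word : String) (k : Int) (n : Int) : String :=
  pvScanB k (word.toList.zip (pvBuildPre word.toList 0))

-- ===== PRECONDITION & SPEC =====
def Spec_is_strong_language (word : String) (k : Int) (n : Int) (out : String) : Prop := out = is_strong_language_alt word k n
instance (word : String) (k : Int) (n : Int) (out : String) : Decidable (Spec_is_strong_language word k n out) := by unfold Spec_is_strong_language; infer_instance

-- ===== CLAIM (what is proved, stated in full; the proofs are below) =====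
def Claim_equal_is_strong_language : Prop := ∀ (word : String) (k : Int) (n : Int), Dom_is_strong_language word k n → Spec_is_strong_language word k n (is_strong_language word k n)

-- ===== LEMMAS AND PROOFS =====

-- ===== VERDICT (by name: the statement is the Claim_ definition above) =====
theorem pvLoop_eq_scan (k : Int) (t : List Char) (c : Int) :
    pvLoopA k t c = pvScanB k (t.zip (pvBuildPre t c)) := by
  induction t generalizing c with
  | nil => simp [pvLoopA, pvBuildPre, pvScanB]
  | cons ch t ih =>
    simp only [pvLoopA, pvBuildPre, List.zip_cons_cons, pvScanB]
    by_cases hs : ch = '*' <;> by_cases hk : c = k <;>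
      simp [hs, hk, ih]

theorem is_strong_language_spec : Claim_equal_is_strong_language := by
  intro word k n _
  unfold Spec_is_strong_language is_strong_language is_strong_language_alt
  exact pvLoop_eq_scan k word.toList 0
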